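-- pv_equiv track=rewrite | github.com/KonradMarzec1991/Codewars-LeetCode | Python/7kyu/7kyu_Duplicate sandwich.py | duplicate_sandwich
-- ===== SOURCE A (Python) =====
-- def duplicate_sandwich(arr):
--     found_duplicate, output = False, []
--     for i in arr:
--         if arr.count(i) > 1:
--             found_duplicate = not found_duplicate
--             continue
--         if found_duplicate:
--             output.append(i)
--     return output
-- ===== SOURCE B (Python) =====
-- def duplicate_sandwich(arr):
--     # Positions of the "toggle" elements (those occurring more than once),
--     # then emit the slices of arr between each odd/even pair of toggles;
--     # an unpaired final toggle opens an interval running to the end.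
--     pos = [i for i, x in enumerate(arr) if arr.count(x) > 1]
--     out = []
--     it = iter(pos)
--     for start in it:
--         end = next(it, len(arr))
--         out.extend(arr[start + 1:end])
--     return out
-- ===== Notes on version B (the rewrite author's own statement) =====
-- stated objective: alternative
-- what changed: Instead of a stateful toggle-flag pass collecting singletons one by one, B computes the index positions of duplicate elements once and concatenates whole slices of arr between each consecutive odd/even pair of toggle positions (the last unpaired toggle opens a slice to the end).
import Mathlib
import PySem

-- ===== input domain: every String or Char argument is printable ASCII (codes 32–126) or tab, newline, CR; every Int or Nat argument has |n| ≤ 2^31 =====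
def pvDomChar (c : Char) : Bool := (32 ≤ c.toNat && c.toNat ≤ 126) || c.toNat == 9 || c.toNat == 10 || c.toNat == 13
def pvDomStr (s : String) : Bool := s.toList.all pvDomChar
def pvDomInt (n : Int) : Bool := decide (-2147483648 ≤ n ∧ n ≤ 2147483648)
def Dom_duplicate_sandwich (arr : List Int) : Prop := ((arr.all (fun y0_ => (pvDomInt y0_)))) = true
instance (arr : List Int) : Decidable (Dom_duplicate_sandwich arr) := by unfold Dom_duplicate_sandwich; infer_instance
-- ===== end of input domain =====

-- B replaces A's toggle-flag scan by collecting duplicate positions once and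
-- concatenating the slices of arr between consecutive pairs of those positions
-- (objective: alternative decomposition, same cost).

-- ===== PORT A =====
def duplicate_sandwich (arr : List Int) : List Int :=
  (arr.foldl
    (fun (st : Bool × List Int) i =>
      if PySem.List.count arr i > 1 then (!st.1, st.2)
      else if st.1 then (st.1, st.2 ++ [i]) else st)
    (false, [])).2

-- ===== PORT B =====
-- helper of port B: the 'for start in it: end = next(it, len(arr))' pair-consuming loop
def dsPairLoop (arr : List Int) : List Int → List Int
  | [] => []
  | [start] => PySem.List.slice arr (some (start + 1)) (some (arr.length : Int))
  | start :: stop :: rest =>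
      PySem.List.slice arr (some (start + 1)) (some stop) ++ dsPairLoop arr rest

def duplicate_sandwich_alt (arr : List Int) : List Int :=
  let pos := (PySem.List.enumerate arr 0).filterMap
    (fun ix => if PySem.List.count arr ix.2 > 1 then some ix.1 else none)
  dsPairLoop arr pos

-- ===== PRECONDITION & SPEC =====
def Spec_duplicate_sandwich (arr : List Int) (out : List Int) : Prop := out = duplicate_sandwich_alt arr
instance (arr : List Int) (out : List Int) : Decidable (Spec_duplicate_sandwich arr out) := by unfold Spec_duplicate_sandwich; infer_instance

-- ===== CLAIM (what is proved, stated in full; the proofs are below) =====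
def Claim_equal_duplicate_sandwich : Prop := ∀ (arr : List Int), Dom_duplicate_sandwich arr → Spec_duplicate_sandwich arr (duplicate_sandwich arr)

-- ===== LEMMAS AND PROOFS =====

-- A's loop as a structural recursion (flag-directed collection)
def recf (p : Int → Bool) : List Int → Bool → List Int
  | [], _ => []
  | x :: xs, flag =>
      if p x then recf p xs (!flag)
      else if flag then x :: recf p xs flag else recf p xs flag

-- positions (as Nats) of elements of l satisfying p
def posL (p : Int → Bool) : List Int → List Nat
  | [] => []
  | x :: xs =>
      if p x then 0 :: (posL p xs).map (· + 1) else (posL p xs).map (· + 1)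

-- B's pair loop with Nat positions and drop/take instead of Python slices
def gloop (l : List Int) : List Nat → List Int
  | [] => []
  | [i] => l.drop (i + 1)
  | i :: j :: rest => (l.drop (i + 1)).take (j - (i + 1)) ++ gloop l rest

theorem foldA (p : Int → Bool) (l : List Int) :
    ∀ (flag : Bool) (acc : List Int),
      (l.foldl (fun (st : Bool × List Int) i =>
          if p i then (!st.1, st.2)
          else if st.1 then (st.1, st.2 ++ [i]) else st) (flag, acc)).2
        = acc ++ recf p l flag := by
  induction l with
  | nil => intro flag acc; simp [recf]
  | cons x xs ih =>
      intro flag acc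
      by_cases h : p x
      · simp [List.foldl, h, ih, recf]
      · by_cases hf : flag <;> simp [List.foldl, h, hf, ih, recf]

theorem gloop_shift (x : Int) (l : List Int) (pos : List Nat) :
    gloop (x :: l) (pos.map (· + 1)) = gloop l pos := by
  induction pos using gloop.induct with
  | case1 => simp [gloop]
  | case2 i => simp [gloop]
  | case3 i j rest ih => simp [gloop, ih, Nat.add_sub_add_right]

theorem main_lemma (p : Int → Bool) (l : List Int) :
    recf p l false = gloop l (posL p l) ∧
    recf p l true = (match posL p l with
                     | [] => l
                     | i :: rest => l.take i ++ gloop l rest) := by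
  induction l with
  | nil => exact ⟨rfl, rfl⟩
  | cons x xs ih =>
      obtain ⟨ihF, ihT⟩ := ih
      by_cases h : p x
      · constructor
        · -- flag false, toggle: opens an interval
          cases hp : posL p xs with
          | nil =>
              have ihT' : recf p xs true = xs := by rw [ihT, hp]
              simp [recf, posL, h, hp, gloop, ihT']
          | cons i rest =>
              have ihT' : recf p xs true = xs.take i ++ gloop xs rest := by
                rw [ihT, hp]
              simp [recf, posL, h, hp, gloop, gloop_shift, ihT']
        · -- flag true, toggle: closes the interval at position 0
          simp [recf, posL, h, gloop_shift, ihF]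
      · constructor
        · simp [recf, posL, h, gloop_shift, ihF]
        · cases hp : posL p xs with
          | nil =>
              have ihT' : recf p xs true = xs := by rw [ihT, hp]
              simp [recf, posL, h, hp, ihT']
          | cons i rest =>
              have ihT' : recf p xs true = xs.take i ++ gloop xs rest := by
                rw [ihT, hp]
              simp [recf, posL, h, hp, ihT', gloop_shift]

theorem pos_of_enumerate (p : Int → Bool) (l : List Int) :
    ∀ s : Int,
      (PySem.List.enumerate l s).filterMap
          (fun ix => if p ix.2 then some ix.1 else none)
        = (posL p l).map (fun n : Nat => s + (n : Int)) := by
  induction l with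
  | nil => intro s; simp [PySem.List.enumerate_nil, posL]
  | cons x xs ih =>
      intro s
      have key : ((posL p xs).map (fun n : Nat => n + 1)).map
            (fun n : Nat => s + (n : Int))
          = (posL p xs).map (fun n : Nat => s + 1 + (n : Int)) := by
        rw [List.map_map]
        exact List.map_congr_left (fun n _ => by
          show s + ((n : Int) + 1) = s + 1 + (n : Int); ring)
      by_cases h : p x <;>
        simp [PySem.List.enumerate_cons, h, posL, ih, key]

theorem dsPairLoop_eq_gloop (arr : List Int) (pos : List Nat) :
    dsPairLoop arr (pos.map (fun n : Nat => (0 : Int) + (n : Int))) = gloop arr pos := by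
  induction pos using gloop.induct with
  | case1 => simp [dsPairLoop, gloop]
  | case2 i =>
      have h1 : (0 : Int) + (i : Int) + 1 = ((i + 1 : Nat) : Int) := by push_cast; ring
      simp only [List.map_cons, List.map_nil, dsPairLoop, gloop, h1,
        PySem.List.slice_natCast]
      exact List.take_of_length_le (by simp)
  | case3 i j rest ih =>
      have h1 : (0 : Int) + (i : Int) + 1 = ((i + 1 : Nat) : Int) := by push_cast; ring
      have h2 : (0 : Int) + (j : Int) = ((j : Nat) : Int) := by ring
      simp only [List.map_cons, dsPairLoop, gloop, h1, h2,
        PySem.List.slice_natCast, ih]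

-- ===== VERDICT (by name: the statement is the Claim_ definition above) =====
theorem duplicate_sandwich_spec : Claim_equal_duplicate_sandwich := by
  intro arr _
  unfold Spec_duplicate_sandwich duplicate_sandwich duplicate_sandwich_alt
  set p := fun x => decide (PySem.List.count arr x > 1) with hp
  have hA : (arr.foldl
      (fun (st : Bool × List Int) i =>
        if PySem.List.count arr i > 1 then (!st.1, st.2)
        else if st.1 then (st.1, st.2 ++ [i]) else st) (false, [])).2
      = recf p arr false := by
    have := foldA p arr false []
    simpa [hp] using this
  have hB : (PySem.List.enumerate arr 0).filterMap
      (fun ix => if PySem.List.count arr ix.2 > 1 then some ix.1 else none)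
      = (posL p arr).map (fun n : Nat => (0 : Int) + (n : Int)) := by
    have := pos_of_enumerate p arr 0
    simpa [hp] using this
  rw [hA, hB, dsPairLoop_eq_gloop]
  exact (main_lemma p arr).1
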